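-- pv_equiv track=rewrite | github.com/dvdotsenko/ges | subprocessio/subprocessio_ironpython.py | chop_off_executable
-- ===== SOURCE A (Python) =====
-- def chop_off_executable(args):
--     """Takes an argument string formatted per
--     http://msdn.microsoft.com/en-us/library/ms880421
--     and chops off the first element from the argument chain.
--
--     This, unfortunately, is not as easy as .split(" ",1)
--     """
--     if not type(args) == type('') or not len(args):
--         raise TypeError("Argument must be non-empty string-like")
--     args = args.strip()
--     if args[0] == '"':
--         i = 1
--         openning_quote = True
--     else:
--         i = 0
--         openning_quote = False
--     got_it = False
--     escaped = False
--     l = len(args)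
--     while not got_it and i < l:
--         c = args[i]
--         if (c == '"' and not escaped and openning_quote) or (c in (' ','\t') and not openning_quote):
--             got_it = True
--         elif c == '\\': # not double slash. To state "one slash" in python strings, i need to escape it.
--             escaped = not escaped
--         else: # any char, including non-closing quotes, quote-enclosed spaces.
--             escaped = False
--         i += 1
--     return args[:i].strip(), args[i:].strip()
-- ===== SOURCE B (Python) =====
-- def chop_off_executable(args):
--     """Split the first executable token off a Windows-style command line."""
--     if not type(args) == type('') or not len(args):
--         raise TypeError("Argument must be non-empty string-like")
--     args = args.strip()
--     l = len(args)
--     if args[0] == '"':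
--         # jump from quote to quote with find(); a quote closes the token
--         # iff the run of backslashes immediately before it has even length
--         i = l
--         j = 1
--         while j < l:
--             p = args.find('"', j)
--             if p == -1:
--                 break
--             head = args[:p]
--             if (len(head) - len(head.rstrip('\\'))) % 2 == 0:
--                 i = p + 1
--                 break
--             j = p + 1
--     else:
--         # bare token ends just past the earlier of find(' ') / find('\t')
--         p = args.find(' ')
--         t = args.find('\t')
--         if p == -1 or (t != -1 and t < p):
--             p = t
--         i = p + 1 if p != -1 else l
--     return args[:i].strip(), args[i:].strip()
-- ===== Notes on version B (the rewrite author's own statement) =====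
-- stated objective: faster
-- what changed: A's single char-by-char while loop with openning_quote/escaped/got_it flags is replaced by find()-driven jumps: the quoted case hops between '"' occurrences with str.find(start) and closes at the first one preceded by an even-length run of backslashes (measured via rstrip('\\')), the bare case takes the earlier of find(' ') and find('\t'); no per-character Python-level state machine remains.
import Mathlib
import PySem

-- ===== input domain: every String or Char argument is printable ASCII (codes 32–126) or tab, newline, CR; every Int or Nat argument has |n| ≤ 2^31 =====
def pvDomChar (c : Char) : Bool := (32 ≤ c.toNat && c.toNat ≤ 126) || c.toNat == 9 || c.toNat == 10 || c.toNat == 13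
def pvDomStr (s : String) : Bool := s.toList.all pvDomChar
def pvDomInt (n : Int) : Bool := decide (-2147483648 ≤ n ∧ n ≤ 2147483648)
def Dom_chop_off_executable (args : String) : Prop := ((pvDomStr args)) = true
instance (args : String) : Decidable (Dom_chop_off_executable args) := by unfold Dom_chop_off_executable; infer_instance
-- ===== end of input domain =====

-- B replaces A's char-by-char flag machine by find()-driven jumps: quoted tokens hop
-- between '"' occurrences checking the backslash-run parity before each, bare tokens
-- take the earlier of find(' ')/find('\t'); objective: faster (C-level scans, same O(n)).

-- ===== PORT A =====
-- A's while loop: state (i, escaped); got_it modelled by returning i+1 at the stop.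
def chopALoop (s : List Char) (oq : Bool) (i : Nat) (escaped : Bool) : Nat :=
  if h : i < s.length then
    let c := s[i]
    if (c = '"' ∧ ¬escaped ∧ oq = true) ∨ ((c = ' ' ∨ c = '\t') ∧ oq = false) then i + 1
    else if c = '\\' then chopALoop s oq (i + 1) (!escaped)
    else chopALoop s oq (i + 1) false
  else i
termination_by s.length - i

def chop_off_executable (args : String) : String × String :=
  let s := (PySem.Str.strip args).toList
  let (i, oq) := if PySem.List.pyGet? s 0 = some '"' then (1, true) else (0, false)
  let j := chopALoop s oq i false
  -- args[:j] / args[j:] with j ≥ 0 are take/drop (PySem.List.slice_to_natCast/slice_from_natCast)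
  (PySem.Str.strip (String.ofList (s.take j)), PySem.Str.strip (String.ofList (s.drop j)))

-- ===== PORT B =====
-- hand port of head.rstrip('\\') (PySem has no rstrip-with-chars): drop trailing backslashes
def rstripBS (l : List Char) : List Char := (l.reverse.dropWhile (fun c => c = '\\')).reverse

-- B's quoted loop: while j < l, jump to the next '"' via find(start); close on even backslash run.
def chopBQuote (s : List Char) (j : Nat) : Nat :=
  if h : j < s.length then
    let p := PySem.Chars.findFrom s ['"'] (j : Int) none
    if hp : p = -1 then s.length
    else
      let head := s.take p.toNat
      if (head.length - (rstripBS head).length) % 2 = 0 then p.toNat + 1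
      else chopBQuote s (p.toNat + 1)
  else s.length
termination_by s.length - j
decreasing_by
  have hs := PySem.Chars.findFrom_natCast_spec s ['"'] j (Nat.le_of_lt h) hp
  have hlen := hs.2.1.length_le
  simp only [List.length_drop, List.length_singleton] at hlen
  have _hj := hs.1
  omega

def chop_off_executable_alt (args : String) : String × String :=
  let s := (PySem.Str.strip args).toList
  let i :=
    if PySem.List.pyGet? s 0 = some '"' then chopBQuote s 1
    else
      let p := PySem.Chars.find s [' ']
      let t := PySem.Chars.find s ['\t']
      let p := if p = -1 ∨ (t ≠ -1 ∧ t < p) then t else p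
      if p ≠ -1 then p.toNat + 1 else s.length
  (PySem.Str.strip (String.ofList (s.take i)), PySem.Str.strip (String.ofList (s.drop i)))

-- ===== PRECONDITION & SPEC =====
-- A raises exactly when args.strip() is empty (TypeError on "", IndexError on whitespace-only).
def Pre_chop_off_executable (args : String) : Prop := (PySem.Str.strip args).toList ≠ []
instance (args : String) : Decidable (Pre_chop_off_executable args) := by unfold Pre_chop_off_executable; infer_instance
def pvWitness_chop_off_executable : String := "\"a b\" c"

def Spec_chop_off_executable (args : String) (out : String × String) : Prop := out = chop_off_executable_alt args
instance (args : String) (out : String × String) : Decidable (Spec_chop_off_executable args out) := by unfold Spec_chop_off_executable; infer_instance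

-- ===== CLAIM (what is proved, stated in full; the proofs are below) =====
def Claim_equal_chop_off_executable : Prop := ∀ (args : String), Dom_chop_off_executable args → Pre_chop_off_executable args → Spec_chop_off_executable args (chop_off_executable args)

-- ===== LEMMAS AND PROOFS =====

theorem singleton_prefix_cons (c x : Char) (l : List Char) : [c] <+: x::l ↔ c = x := by
  constructor
  · rintro ⟨t, ht⟩; exact (List.cons_eq_cons.mp ht).1
  · rintro rfl; exact ⟨l, rfl⟩

theorem find_cons_singleton (x c : Char) (l : List Char) :
    PySem.Chars.find (x :: l) [c] =
      if x = c then 0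
      else if PySem.Chars.find l [c] = -1 then -1 else PySem.Chars.find l [c] + 1 := by
  by_cases hx : x = c
  · subst hx
    rw [if_pos rfl]
    have hinf : [x] <:+: (x :: l) := ((singleton_prefix_cons x x l).mpr rfl).isInfix
    have h0 : 0 ≤ PySem.Chars.find (x :: l) [x] := (PySem.Chars.find_nonneg_iff _ _).mpr hinf
    have hs := PySem.Chars.find_spec (s := x :: l) (sub := [x]) h0
    by_cases hz : (PySem.Chars.find (x :: l) [x]).toNat = 0
    · have h1 := Int.toNat_eq_zero.mp hz; omega
    · exact absurd ((singleton_prefix_cons x x l).mpr rfl)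
        (by simpa using hs.2 0 (Nat.pos_of_ne_zero hz))
  · rw [if_neg hx]
    have hiff : ([c] <:+: x :: l) ↔ ([c] <:+: l) := by
      rw [List.singleton_infix_iff, List.singleton_infix_iff, List.mem_cons]
      simp [Ne.symm hx]
    by_cases hnl : PySem.Chars.find l [c] = -1
    · rw [if_pos hnl]
      rw [PySem.Chars.find_eq_neg_one_iff] at hnl ⊢
      exact fun h => hnl (hiff.mp h)
    · rw [if_neg hnl]
      have hf0 : 0 ≤ PySem.Chars.find l [c] := by
        have := PySem.Chars.neg_one_le_find l [c]; omega
      have hfs := PySem.Chars.find_spec (s := l) (sub := [c]) hf0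
      have hg0 : 0 ≤ PySem.Chars.find (x :: l) [c] := by
        rw [PySem.Chars.find_nonneg_iff, hiff]
        rw [← PySem.Chars.find_ne_neg_one_iff]; exact hnl
      have hgs := PySem.Chars.find_spec (s := x :: l) (sub := [c]) hg0
      set g := PySem.Chars.find (x :: l) [c] with hg
      set f := PySem.Chars.find l [c] with hf
      -- g.toNat ≠ 0
      have hgz : g.toNat ≠ 0 := by
        intro h
        have := hgs.1
        rw [h, List.drop_zero, singleton_prefix_cons] at this
        exact hx this.symm
      -- prefix in l at g.toNat - 1
      have hpl : [c] <+: l.drop (g.toNat - 1) := by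
        have := hgs.1
        rwa [show g.toNat = (g.toNat - 1) + 1 by omega, List.drop_succ_cons] at this
      have h1 : ¬ (g.toNat - 1 < f.toNat) := fun hlt => hfs.2 _ hlt hpl
      -- prefix in x::l at f.toNat + 1
      have hpx : [c] <+: (x :: l).drop (f.toNat + 1) := by
        rw [List.drop_succ_cons]; exact hfs.1
      have h2 : ¬ (f.toNat + 1 < g.toNat) := fun hlt => hgs.2 _ hlt hpx
      omega

-- wIdx l = index just past the first ' '/'\t' of l, or l.length
def wIdx : List Char → Nat
  | [] => 0
  | c :: t => if c = ' ' ∨ c = '\t' then 1 else wIdx t + 1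

theorem chopALoop_bare (s : List Char) (i : Nat) (escaped : Bool) :
    chopALoop s false i escaped = i + wIdx (s.drop i) := by
  rw [chopALoop]
  by_cases h : i < s.length
  · simp only [h, dif_pos]
    have hdrop : s.drop i = s[i] :: s.drop (i + 1) := by
      rw [List.drop_eq_getElem_cons h]
    by_cases hw : s[i] = ' ' ∨ s[i] = '\t'
    · rw [if_pos (by simp [hw]), hdrop]
      simp [wIdx, hw]
    · rw [if_neg (by simp [hw]), hdrop]
      by_cases hb : s[i] = '\\'
      · rw [if_pos hb, chopALoop_bare s (i + 1) (!escaped)]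
        simp [wIdx, hw]; omega
      · rw [if_neg hb, chopALoop_bare s (i + 1) false]
        simp [wIdx, hw]; omega
  · simp only [h, dif_neg, not_false_iff]
    rw [List.drop_eq_nil_of_le (by omega)]
    simp [wIdx]
termination_by s.length - i

theorem bareB_eq_wIdx (s : List Char) :
    (let p := PySem.Chars.find s [' ']
     let t := PySem.Chars.find s ['\t']
     let p := if p = -1 ∨ (t ≠ -1 ∧ t < p) then t else p
     if p ≠ -1 then p.toNat + 1 else s.length) = wIdx s := by
  induction s with
  | nil =>
    have h1 : PySem.Chars.find [] [' '] = -1 := by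
      rw [PySem.Chars.find_eq_neg_one_iff]
      intro h; have := h.sublist.length_le; simp at this
    have h2 : PySem.Chars.find [] ['\t'] = -1 := by
      rw [PySem.Chars.find_eq_neg_one_iff]
      intro h; have := h.sublist.length_le; simp at this
    simp [h1, h2, wIdx]
  | cons c l ih =>
    rw [find_cons_singleton, find_cons_singleton]
    have hsp := PySem.Chars.neg_one_le_find l [' ']
    have htb := PySem.Chars.neg_one_le_find l ['\t']
    by_cases hc1 : c = ' '
    · subst hc1
      simp only [wIdx, true_or, if_pos]
      split_ifs <;> simp_all <;> omega
    · by_cases hc2 : c = '\t'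
      · subst hc2
        simp only [wIdx, or_true, if_pos]
        split_ifs <;> simp_all <;> omega
      · rw [if_neg hc1, if_neg hc2]
        simp only [wIdx, hc1, hc2, false_or]
        rw [← ih]
        set f1 := PySem.Chars.find l [' '] with hf1
        set f2 := PySem.Chars.find l ['\t'] with hf2
        by_cases h1 : f1 = -1 <;> by_cases h2 : f2 = -1 <;>
          simp only [h1, h2] <;> simp [h1, h2] <;> split_ifs <;> omega

-- trailing-backslash count after appending one char
theorem rstripBS_append (l : List Char) (c : Char) :
    l.length + 1 - (rstripBS (l ++ [c])).length =
      if c = '\\' then (l.length - (rstripBS l).length) + 1 else 0 := by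
  unfold rstripBS
  have hrev : (l ++ [c]).reverse = c :: l.reverse := by simp
  rw [hrev]
  by_cases hc : c = '\\'
  · rw [if_pos hc]
    rw [List.dropWhile_cons_of_pos (by simp [hc])]
    have := List.length_dropWhile_le (fun c => decide (c = '\\')) l.reverse
    simp only [List.length_reverse] at *
    omega
  · rw [if_neg hc]
    rw [List.dropWhile_cons_of_neg (by simp [hc])]
    simp

-- (a) find a quote at its own position

theorem findFrom_self (s : List Char) (i : Nat) (h : i < s.length) (hq : s[i] = '"') :
    PySem.Chars.findFrom s ['"'] (i : Int) none = i := by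
  have hdrop : s.drop i = s[i] :: s.drop (i + 1) := List.drop_eq_getElem_cons h
  rw [PySem.Chars.findFrom_natCast s ['"'] i (Nat.le_of_lt h)]
  rw [hdrop, find_cons_singleton, if_pos hq]
  simp

-- (b) a non-quote position is skipped by find

theorem findFrom_step (s : List Char) (i : Nat) (h : i < s.length) (hq : s[i] ≠ '"') :
    PySem.Chars.findFrom s ['"'] (i : Int) none =
      PySem.Chars.findFrom s ['"'] ((i : Nat) + 1 : Nat) none := by
  have hdrop : s.drop i = s[i] :: s.drop (i + 1) := List.drop_eq_getElem_cons h
  rw [PySem.Chars.findFrom_natCast s ['"'] i (Nat.le_of_lt h),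
      PySem.Chars.findFrom_natCast s ['"'] (i + 1) (by omega)]
  rw [hdrop, find_cons_singleton, if_neg hq]
  by_cases hn : PySem.Chars.find (s.drop (i + 1)) ['"'] = -1
  · simp [hn]
  · have := PySem.Chars.neg_one_le_find (s.drop (i + 1)) ['"']
    simp only [hn, if_false]
    push_cast
    rw [if_neg (by omega)]
    ring

-- (d) chopBQuote ignores a non-quote position

theorem chopBQuote_step (s : List Char) (i : Nat) (h : i < s.length) (hq : s[i] ≠ '"') :
    chopBQuote s i = chopBQuote s (i + 1) := by
  rw [chopBQuote, dif_pos h, findFrom_step s i h hq]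
  by_cases hp : PySem.Chars.findFrom s ['"'] ((i + 1 : Nat) : Int) none = -1
  · rw [dif_pos hp, chopBQuote]
    by_cases h1 : i + 1 < s.length
    · rw [dif_pos h1, dif_pos hp]
    · rw [dif_neg h1]
  · have hs := PySem.Chars.findFrom_natCast_spec s ['"'] (i + 1)
      (by omega) hp
    have hlen := hs.2.1.length_le
    simp only [List.length_drop, List.length_singleton] at hlen
    have h2 := hs.1
    have h1 : i + 1 < s.length := by omega
    rw [dif_neg hp]
    conv_rhs => rw [chopBQuote]
    rw [dif_pos h1, dif_neg hp]

theorem chopALoop_quoted (s : List Char) (i : Nat) (esc : Bool) (hi : i ≤ s.length)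
    (hesc : esc = decide (((s.take i).length - (rstripBS (s.take i)).length) % 2 = 1)) :
    chopALoop s true i esc = chopBQuote s i := by
  rw [chopALoop]
  by_cases h : i < s.length
  · simp only [h, dif_pos]
    have hlen : (s.take i).length = i := by simp [List.length_take]; omega
    have htake : s.take (i + 1) = s.take i ++ [s[i]] := by
      rw [List.take_add_one]; simp [List.getElem?_eq_getElem h]
    have hR := rstripBS_append (s.take i) (s[i])
    rw [hlen] at hR
    set r := (s.take i).length - (rstripBS (s.take i)).length with hr
    rw [hlen] at hr
    by_cases hqc : s[i] = '"'
    · cases esc with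
      | false =>
        have hr0 : r % 2 = 0 := by
          have := of_decide_eq_false hesc.symm
          omega
        rw [if_pos (by simp [hqc])]
        rw [chopBQuote, dif_pos h, findFrom_self s i h hqc,
            dif_neg (show ¬((i : Nat) : Int) = -1 by omega)]
        simp only [Int.toNat_natCast]
        rw [if_pos (by rw [hlen, ← hr]; exact hr0)]
      | true =>
        have hr1 : r % 2 = 1 := of_decide_eq_true hesc.symm
        rw [if_neg (by simp [hqc])]
        rw [if_neg (by rw [hqc]; decide)]
        rw [chopBQuote, dif_pos h, findFrom_self s i h hqc,
            dif_neg (show ¬((i : Nat) : Int) = -1 by omega)]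
        simp only [Int.toNat_natCast]
        rw [if_neg (by rw [hlen, ← hr]; omega)]
        refine chopALoop_quoted s (i + 1) false (by omega) ?_
        rw [htake, List.length_append, hlen, List.length_singleton, hR,
            if_neg (by rw [hqc]; decide)]
        simp
    · rw [if_neg (by simp [hqc]), chopBQuote_step s i h hqc]
      by_cases hb : s[i] = '\\'
      · rw [if_pos hb]
        refine chopALoop_quoted s (i + 1) (!esc) (by omega) ?_
        rw [htake, List.length_append, hlen, List.length_singleton, hR, if_pos hb, ← hr]
        cases esc with
        | false =>
          have h0 := of_decide_eq_false hesc.symm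
          rw [show (!false) = true from rfl, eq_comm, decide_eq_true_eq]
          omega
        | true =>
          have h1 := of_decide_eq_true hesc.symm
          rw [show (!true) = false from rfl, eq_comm, decide_eq_false_iff_not]
          omega
      · rw [if_neg hb]
        refine chopALoop_quoted s (i + 1) false (by omega) ?_
        rw [htake, List.length_append, hlen, List.length_singleton, hR, if_neg hb]
        simp
  · rw [dif_neg h, chopBQuote, dif_neg h]
    omega
termination_by s.length - i

-- ===== VERDICT (by name: the statement is the Claim_ definition above) =====
theorem chop_off_executable_spec : Claim_equal_chop_off_executable := by
  intro args _ hpre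
  unfold Spec_chop_off_executable chop_off_executable chop_off_executable_alt
  set s := (PySem.Str.strip args).toList with hs
  by_cases hq : PySem.List.pyGet? s 0 = some '"'
  · simp only [hq, if_pos]
    have h0 : s[0]? = some '"' := by
      rw [← PySem.List.pyGet?_zero]; exact hq
    cases hsl : s with
    | nil => exact absurd hsl hpre
    | cons a t =>
      rw [hsl] at h0
      simp only [List.getElem?_cons_zero, Option.some.injEq] at h0
      subst h0
      rw [← hsl]
      rw [chopALoop_quoted s 1 false (by rw [hsl]; simp) ?_]
      rw [hsl]
      simp [rstripBS]
  · simp only [hq, if_false]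
    rw [chopALoop_bare s 0 false]
    rw [bareB_eq_wIdx s]
    simp
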